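-- pv_equiv track=rewrite | github.com/Kamilet/learning-coding | simple-program/sMartix/planning.py | sm_gen
-- ===== SOURCE A (Python) =====
-- def sm_gen(row: int = 1, colume: int = 1, items=0, unit=False, eye=False):
--     '''Generate a matrix with row and colume,
--     items can be numbers or string (can't calculate)
--     set unit=True or eye=True to generate a unit matrix with row: sm_gen(row, eye=True)'''
--     # 生成一个矩阵，可以设置行列以及默认填充的元素
--     # 默认1行，1列，填充数字0
--     # 设置unit为True会生成单位矩阵，根据row
--     if unit or eye:
--         matrix = sm_gen(row, row, items=0)
--         for i in range(row):
--             matrix[i][i] = 1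
--     else:
--         matrix = [None] * row
--         for _r in range(row):
--             matrix[_r] = [items] * colume
--     return matrix
-- ===== SOURCE B (Python) =====
-- def sm_gen(row: int = 1, colume: int = 1, items=0, unit=False, eye=False):
--     '''Generate a matrix with row and colume; unit/eye gives the row x row identity.'''
--     if unit or eye:
--         # identity as successive right-rotations of the base row [1,0,...,0]
--         base = [1] + [0] * (row - 1)
--         return [base[-i:] + base[:-i] for i in range(row)]
--     # one flat buffer, chunked into rows by slicing
--     rows = max(row, 0)
--     cols = max(colume, 0)
--     flat = [items] * (rows * cols)
--     return [flat[r * cols:(r + 1) * cols] for r in range(row)]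
-- ===== Notes on version B (the rewrite author's own statement) =====
-- stated objective: alternative
-- what changed: Identity matrices are built as successive right-rotations (slice concatenation) of the single base row [1,0,...,0] instead of recursively building a zero matrix and mutating its diagonal; the fill branch allocates one flat buffer of row*colume items and chunks it into rows by slicing instead of overwriting a [None]*row placeholder row by row.
import Mathlib
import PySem

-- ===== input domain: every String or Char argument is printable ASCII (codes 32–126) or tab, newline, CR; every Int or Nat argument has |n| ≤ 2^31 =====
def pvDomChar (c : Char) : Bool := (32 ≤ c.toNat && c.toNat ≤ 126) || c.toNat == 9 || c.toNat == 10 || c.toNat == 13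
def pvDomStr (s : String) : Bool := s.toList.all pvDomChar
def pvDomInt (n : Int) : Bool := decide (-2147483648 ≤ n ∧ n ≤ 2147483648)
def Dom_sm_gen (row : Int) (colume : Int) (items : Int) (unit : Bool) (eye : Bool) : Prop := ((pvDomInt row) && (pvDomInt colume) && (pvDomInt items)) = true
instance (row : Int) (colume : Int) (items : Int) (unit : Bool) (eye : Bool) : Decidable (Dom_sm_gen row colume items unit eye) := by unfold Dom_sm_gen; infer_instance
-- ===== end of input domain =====

-- B builds identity rows as slice-rotations of one base row, and the fill matrix by
-- chunking one flat row*colume buffer into rows with slices, instead of A's recursive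
-- zero-matrix + diagonal mutation and placeholder-overwrite loop; objective: alternative.

-- ===== PORT A =====
-- Literal port of A. The recursive call happens only in the unit/eye branch, with
-- unit=eye=false in the callee, hence the 1/0 termination measure.
-- '[None]*row' is ported as 'List.replicate row.toNat []': every slot is overwritten
-- by the loop before the matrix is returned, so the placeholder value is never observable.
-- 'matrix[i]'/'matrix[i][i]' are in range by construction (0 ≤ i < row = len matrix),
-- so List.getD/List.set are exact here.
def sm_gen (row : Int) (colume : Int) (items : Int) (unit : Bool) (eye : Bool) : List (List Int) :=
  if h : unit || eye then
    let matrix := sm_gen row row 0 false false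
    (PySem.List.pyRange 0 row 1).foldl
      (fun m i => m.set i.toNat ((m.getD i.toNat []).set i.toNat 1)) matrix
  else
    let matrix : List (List Int) := List.replicate row.toNat []
    (PySem.List.pyRange 0 row 1).foldl
      (fun m r => m.set r.toNat (List.replicate colume.toNat items)) matrix
termination_by (if unit || eye then 1 else 0)
decreasing_by simp [h]

-- ===== PORT B =====
-- '[1] + [0]*(row-1)' is '1 :: replicate (row-1).toNat 0'; 'base[-i:]', 'base[:-i]' and
-- 'flat[r*colume:(r+1)*colume]' are PySem slices (exact, including i = 0 where -0 = 0).
def sm_gen_alt (row : Int) (colume : Int) (items : Int) (unit : Bool) (eye : Bool) : List (List Int) :=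
  if unit || eye then
    let base : List Int := 1 :: List.replicate (row - 1).toNat 0
    (PySem.List.pyRange 0 row 1).map (fun i =>
      PySem.List.slice base (some (-i)) none ++ PySem.List.slice base none (some (-i)))
  else
    let rows := max row 0
    let cols := max colume 0
    let flat : List Int := List.replicate (rows * cols).toNat items
    (PySem.List.pyRange 0 row 1).map (fun r =>
      PySem.List.slice flat (some (r * cols)) (some ((r + 1) * cols)))

-- ===== PRECONDITION & SPEC =====
def Spec_sm_gen (row : Int) (colume : Int) (items : Int) (unit : Bool) (eye : Bool) (out : List (List Int)) : Prop := out = sm_gen_alt row colume items unit eye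
instance (row : Int) (colume : Int) (items : Int) (unit : Bool) (eye : Bool) (out : List (List Int)) : Decidable (Spec_sm_gen row colume items unit eye out) := by unfold Spec_sm_gen; infer_instance

-- ===== CLAIM =====
def Claim_equal_sm_gen : Prop := ∀ (row : Int) (colume : Int) (items : Int) (unit : Bool) (eye : Bool), Dom_sm_gen row colume items unit eye → Spec_sm_gen row colume items unit eye (sm_gen row colume items unit eye)

-- ===== LEMMAS AND PROOFS =====

-- A's fill loop: overwriting slots 0..n-1 of a list with v.
lemma fill_loop (v : List Int) : ∀ (n : ℕ) (m : List (List Int)), n ≤ m.length →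
    (List.range n).foldl (fun m r => m.set r v) m = List.replicate n v ++ m.drop n := by
  intro n
  induction n with
  | zero => intro m _; simp
  | succ k ih =>
    intro m hm
    rw [List.range_succ, List.foldl_append, ih m (by omega)]
    simp only [List.foldl_cons, List.foldl_nil]
    have hd : m.drop k = m[k] :: m.drop (k+1) := List.drop_eq_getElem_cons (by omega)
    rw [List.set_append_right _ _ (by simp)]
    simp only [List.length_replicate, Nat.sub_self, List.replicate_succ', List.append_assoc]
    rw [hd, List.set_cons_zero]
    simp

-- A's diagonal loop on the zero matrix
lemma diag_loop (n : ℕ) : ∀ (k : ℕ), k ≤ n →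
    (List.range k).foldl (fun m i => m.set i ((m.getD i []).set i 1))
      (List.replicate n (List.replicate n (0:Int)))
    = (List.range n).map (fun i =>
        if i < k then (List.replicate n (0:Int)).set i 1 else List.replicate n 0) := by
  intro k
  induction k with
  | zero =>
    intro _
    simp
  | succ k ih =>
    intro hk
    rw [List.range_succ, List.foldl_append, ih (by omega)]
    simp only [List.foldl_cons, List.foldl_nil]
    apply List.ext_getElem
    · simp
    · intro j h1 h2
      simp only [List.length_map, List.length_range] at h1 h2
      have hget : ((List.range n).map (fun i =>
          if i < k then (List.replicate n (0:Int)).set i 1 else List.replicate n 0)).getD k []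
          = List.replicate n 0 := by
        rw [List.getD_eq_getElem _ _ (by simpa using hk)]
        simp
      simp only [hget]
      simp only [List.getElem_set, List.getElem_map, List.getElem_range]
      rcases Nat.lt_trichotomy j k with h | h | h
      · simp [h, Nat.lt_succ_of_lt h, Nat.ne_of_gt h]
      · simp [h]
      · simp [Nat.not_lt.mpr (Nat.le_of_lt h), Nat.ne_of_lt h, Nat.not_le.mpr h]

-- A's else-branch equals a replicate matrix
lemma sm_gen_false (row colume items : Int) (unit eye : Bool) (h : (unit || eye) = false) :
    sm_gen row colume items unit eye
    = List.replicate row.toNat (List.replicate colume.toNat items) := by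
  rw [sm_gen]
  simp only [h, dite_false, Bool.false_eq_true]
  rw [PySem.List.pyRange_one]
  have hmap : List.map (fun k : ℕ => (0:Int) + ↑k) (List.range (row - 0).toNat)
      = List.map (fun k : ℕ => (k:Int)) (List.range row.toNat) := by simp
  rw [hmap, List.foldl_map]
  simp only [Int.toNat_natCast]
  have := fill_loop (List.replicate colume.toNat items) row.toNat
      (List.replicate row.toNat []) (by simp)
  simpa using this

-- B's else-branch equals the same replicate matrix
lemma chunk_row (c N k : ℕ) (items : Int) (h : (k + 1) * c ≤ N) :
    PySem.List.slice (List.replicate N items)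
      (some ((k * c : ℕ) : Int)) (some (((k * c : ℕ) : Int) + ((c : ℕ) : Int)))
    = List.replicate c items := by
  rw [PySem.List.slice_natCast_add, List.drop_replicate, List.take_replicate]
  have h' : k * c + c ≤ N := by rw [Nat.succ_mul] at h; exact h
  congr 1
  omega

lemma sm_gen_alt_false (row colume items : Int) (unit eye : Bool) (h : (unit || eye) = false) :
    sm_gen_alt row colume items unit eye
    = List.replicate row.toNat (List.replicate colume.toNat items) := by
  rw [sm_gen_alt]
  simp only [h, Bool.false_eq_true, if_false]
  rw [PySem.List.pyRange_one]
  have hmap : List.map (fun k : ℕ => (0:Int) + ↑k) (List.range (row - 0).toNat)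
      = List.map (fun k : ℕ => (k:Int)) (List.range row.toNat) := by simp
  rw [hmap, List.map_map]
  apply List.ext_getElem (by simp)
  intro i h1 h2
  simp only [List.length_map, List.length_range] at h1
  simp only [List.getElem_map, List.getElem_range, List.getElem_replicate, Function.comp]
  have hc : (0:Int) ≤ max colume 0 := le_max_right _ _
  have hr : (0:Int) ≤ max row 0 := le_max_right _ _
  have hN : (max row 0 * max colume 0).toNat = (max row 0).toNat * (max colume 0).toNat := by
    rcases Int.eq_ofNat_of_zero_le hr with ⟨a, ha⟩
    rcases Int.eq_ofNat_of_zero_le hc with ⟨b, hb⟩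
    rw [ha, hb, ← Nat.cast_mul, Int.toNat_natCast, Int.toNat_natCast, Int.toNat_natCast]
  have e1 : ((i:Int) * max colume 0) = ((i * (max colume 0).toNat : ℕ) : Int) := by
    push_cast [Int.toNat_of_nonneg hc]; ring
  have e2 : ((i:Int) + 1) * max colume 0
      = ((i * (max colume 0).toNat : ℕ) : Int) + (((max colume 0).toNat : ℕ) : Int) := by
    push_cast [Int.toNat_of_nonneg hc]; ring
  rw [e1, e2, hN]
  have hle : (i + 1) * (max colume 0).toNat ≤ (max row 0).toNat * (max colume 0).toNat := by
    have : i + 1 ≤ (max row 0).toNat := by omega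
    exact Nat.mul_le_mul_right _ this
  rw [chunk_row _ _ _ items hle]
  congr 1
  omega

-- one rotation row of the base row equals the k-th identity row
lemma rot_row (n k : ℕ) (hk : k < n) :
    PySem.List.slice (1 :: List.replicate (n - 1) (0:Int)) (some (-(k:Int))) none
      ++ PySem.List.slice (1 :: List.replicate (n - 1) (0:Int)) none (some (-(k:Int)))
    = (List.replicate n (0:Int)).set k 1 := by
  have hlen : (1 :: List.replicate (n - 1) (0:Int)).length = n := by simp; omega
  rcases Nat.eq_zero_or_pos k with h0 | hpos
  · subst h0
    simp only [Nat.cast_zero, neg_zero]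
    rw [show ((0:Int) = ((0:ℕ):Int)) from rfl,
        PySem.List.slice_from_natCast, PySem.List.slice_to_natCast]
    simp only [List.drop_zero, List.take_zero, List.append_nil]
    apply List.ext_getElem (by simp; omega)
    intro j h1 h2
    cases j with
    | zero => simp
    | succ m => simp
  · rw [PySem.List.slice_from_neg_natCast _ _ hpos, PySem.List.slice_to_neg_natCast _ _ hpos,
        hlen]
    have h1 : n - k = (n - k - 1) + 1 := by omega
    have hdrop : (1 :: List.replicate (n - 1) (0:Int)).drop (n - k)
        = List.replicate k 0 := by
      rw [h1, List.drop_succ_cons, List.drop_replicate]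
      congr 1; omega
    have htake : (1 :: List.replicate (n - 1) (0:Int)).take (n - k)
        = 1 :: List.replicate (n - k - 1) 0 := by
      rw [h1, List.take_succ_cons, List.take_replicate]
      have hmin : min (n - k - 1) (n - 1) = n - k - 1 := by omega
      rw [hmin]
      simp
    rw [hdrop, htake]
    apply List.ext_getElem (by simp; omega)
    intro j hj1 hj2
    simp only [List.getElem_set, List.getElem_replicate, List.getElem_append,
      List.length_replicate]
    by_cases hjk : j < k
    · simp [hjk, Nat.ne_of_gt hjk]
    · rcases Nat.eq_or_lt_of_le (Nat.not_lt.mp hjk) with he | hlt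
      · subst he
        simp
      · have h2 : j - k = (j - k - 1) + 1 := by omega
        rw [dif_neg hjk, if_neg (Nat.ne_of_lt hlt)]
        rw [List.getElem_cons]
        rw [dif_neg (by omega)]
        simp

-- ===== VERDICT =====
theorem sm_gen_spec : Claim_equal_sm_gen := by
  intro row colume items unit eye _
  unfold Spec_sm_gen
  by_cases h : (unit || eye) = true
  · -- identity branch: both sides equal (range n).map (fun i => (replicate n 0).set i 1)
    rw [sm_gen]
    simp only [h, dite_true]
    rw [sm_gen_false _ _ _ false false rfl, PySem.List.pyRange_one]
    have hmap : List.map (fun k : ℕ => (0:Int) + ↑k) (List.range (row - 0).toNat)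
        = List.map (fun k : ℕ => (k:Int)) (List.range row.toNat) := by simp
    rw [hmap, List.foldl_map]
    have hd := diag_loop row.toNat row.toNat (le_refl _)
    simp only [Int.toNat_natCast] at hd ⊢
    rw [hd]
    unfold sm_gen_alt
    simp only [h, if_true]
    rw [PySem.List.pyRange_one, hmap, List.map_map]
    refine List.map_congr_left fun k hk => ?_
    simp only [List.mem_range] at hk
    have hrow : (row - 1).toNat = row.toNat - 1 := by omega
    simp only [Function.comp, hrow, if_pos hk]
    exact (rot_row row.toNat k hk).symm
  · rw [sm_gen_false row colume items unit eye (by simpa using h),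
        sm_gen_alt_false row colume items unit eye (by simpa using h)]
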